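-- pv_equiv track=rewrite | github.com/josephmate/AdventOfCode2019 | 04/SecureContainer.py | hasExactlyTwoSameAdjacentDigits
-- ===== SOURCE A (Python) =====
-- def hasExactlyTwoSameAdjacentDigits(digits):
--     sameCount = 1
--     previousDigit = 10
--     for digit in digits:
--         if digit == previousDigit:
--             sameCount = sameCount + 1
--         elif sameCount == 2:
--             return True
--         else:
--             sameCount = 1
--
--         previousDigit = digit
--     return sameCount == 2
-- ===== SOURCE B (Python) =====
-- def hasExactlyTwoSameAdjacentDigits(digits):
--     i, n = 0, len(digits)
--     while i < n:
--         j = i + 1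
--         while j < n and digits[j] == digits[i]:
--             j += 1
--         if j - i == 2:
--             return True
--         i = j
--     return False
-- ===== Notes on version B (the rewrite author's own statement) =====
-- stated objective: alternative
-- what changed: Replaces the per-element state machine (sameCount/previousDigit with a sentinel seed of 10) by a run-splitting scan that jumps over each maximal run of equal values and tests whether its length is exactly 2.
-- intended difference: On lists whose leading run of the value 10 has length 1 or 2 and whose remainder has no run of length exactly 2, A's sentinel seed previousDigit=10 counts a phantom extra element in the leading run (e.g. A returns True on [10]); B returns the answer determined by the actual runs, which is the intended behaviour since 10 is meant as an impossible sentinel, not data. — e.g. on hasExactlyTwoSameAdjacentDigits([10]): A returns true, B returns false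
import Mathlib
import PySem

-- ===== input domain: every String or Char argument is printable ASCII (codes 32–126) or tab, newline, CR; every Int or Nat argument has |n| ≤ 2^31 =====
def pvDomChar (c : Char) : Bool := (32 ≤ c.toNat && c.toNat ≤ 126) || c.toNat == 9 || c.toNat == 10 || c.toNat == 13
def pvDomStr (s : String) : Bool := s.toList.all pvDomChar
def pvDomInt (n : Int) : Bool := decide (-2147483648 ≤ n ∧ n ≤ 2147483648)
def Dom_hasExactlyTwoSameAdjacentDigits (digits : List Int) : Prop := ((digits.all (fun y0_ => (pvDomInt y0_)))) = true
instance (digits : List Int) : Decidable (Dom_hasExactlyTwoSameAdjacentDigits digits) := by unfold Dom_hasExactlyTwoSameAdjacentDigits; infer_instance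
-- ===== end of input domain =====

-- B replaces A's per-element state machine by a run-splitting scan; A's sentinel seed
-- previousDigit = 10 makes it wrong on lists starting with the value 10 (stated as D_ below).

-- ===== PORT A =====
-- A's for-loop over digits with state (sameCount, previousDigit), branches in A's order
def pvGoA : List Int → Int → Int → Bool
  | [], sameCount, _ => sameCount == 2
  | digit :: rest, sameCount, previousDigit =>
    if digit == previousDigit then pvGoA rest (sameCount + 1) digit
    else if sameCount == 2 then true
    else pvGoA rest 1 digit

def hasExactlyTwoSameAdjacentDigits (digits : List Int) : Bool :=
  pvGoA digits 1 10

-- ===== PORT B =====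
-- Source B's outer while loop: each step consumes one maximal run (the inner while scan =
-- takeWhile/dropWhile) and tests whether its length is exactly 2.  The fuel argument
-- (initially the list length) only makes the recursion structural; it is never exhausted.
def pvAltRun : Nat → List Int → Bool
  | _, [] => false
  | 0, _ :: _ => false
  | fuel + 1, d :: rest =>
    ((rest.takeWhile (fun x => x == d)).length + 1 == 2)
      || pvAltRun fuel (rest.dropWhile (fun x => x == d))

def hasExactlyTwoSameAdjacentDigits_alt (digits : List Int) : Bool :=
  pvAltRun digits.length digits

-- ===== PRECONDITION & SPEC =====
-- run-length encoding of the input (used only to STATE D_; independent of both ports)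
def pvRLE : Int → Nat → List Int → List Nat
  | _, count, [] => [count]
  | prev, count, x :: xs =>
    if x == prev then pvRLE prev (count + 1) xs else count :: pvRLE x 1 xs

def pvRunLengths : List Int → List Nat
  | [] => []
  | d :: rest => pvRLE d 1 rest

-- On lists whose leading run of the value 10 has length 1 or 2 and whose remainder has no run of
-- length exactly 2, A's sentinel seed previousDigit = 10 counts a phantom extra element in the
-- leading run and returns the wrong Bool (e.g. True on [10]); B returns the answer determined by
-- the actual runs, the intended behaviour since 10 is meant as an impossible sentinel, not data.
def D_hasExactlyTwoSameAdjacentDigits (digits : List Int) : Prop :=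
  digits.head? = some 10 ∧
  ((digits.takeWhile (fun x => x == 10)).length = 1 ∨
   (digits.takeWhile (fun x => x == 10)).length = 2) ∧
  ¬ (2 ∈ pvRunLengths (digits.dropWhile (fun x => x == 10)))
instance (digits : List Int) : Decidable (D_hasExactlyTwoSameAdjacentDigits digits) := by
  unfold D_hasExactlyTwoSameAdjacentDigits; infer_instance

def Spec_hasExactlyTwoSameAdjacentDigits (digits : List Int) (out : Bool) : Prop :=
  ¬ D_hasExactlyTwoSameAdjacentDigits digits → out = hasExactlyTwoSameAdjacentDigits_alt digits
instance (digits : List Int) (out : Bool) : Decidable (Spec_hasExactlyTwoSameAdjacentDigits digits out) := by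
  unfold Spec_hasExactlyTwoSameAdjacentDigits; infer_instance

def pvDiffWitness_hasExactlyTwoSameAdjacentDigits : List Int := [10]
def pvDiffWitnessOut_hasExactlyTwoSameAdjacentDigits : Bool × Bool := (true, false)

-- ===== CLAIM (what is proved, stated in full; the proofs are below) =====
def Claim_unchanged_hasExactlyTwoSameAdjacentDigits : Prop := ∀ (digits : List Int), Dom_hasExactlyTwoSameAdjacentDigits digits → Spec_hasExactlyTwoSameAdjacentDigits digits (hasExactlyTwoSameAdjacentDigits digits)
def Claim_changed_hasExactlyTwoSameAdjacentDigits : Prop := Dom_hasExactlyTwoSameAdjacentDigits (pvDiffWitness_hasExactlyTwoSameAdjacentDigits) ∧ D_hasExactlyTwoSameAdjacentDigits (pvDiffWitness_hasExactlyTwoSameAdjacentDigits) ∧ hasExactlyTwoSameAdjacentDigits (pvDiffWitness_hasExactlyTwoSameAdjacentDigits) = pvDiffWitnessOut_hasExactlyTwoSameAdjacentDigits.1 ∧ hasExactlyTwoSameAdjacentDigits_alt (pvDiffWitness_hasExactlyTwoSameAdjacentDigits) = pvDiffWitnessOut_hasExactlyTwoSameAdjacentDigits.2 ∧ pvDiffWitnessOut_hasExactlyTwoSameAdjacentDigits.1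 ≠ pvDiffWitnessOut_hasExactlyTwoSameAdjacentDigits.2
def Claim_exact_hasExactlyTwoSameAdjacentDigits : Prop := ∀ (digits : List Int), Dom_hasExactlyTwoSameAdjacentDigits digits → D_hasExactlyTwoSameAdjacentDigits digits → hasExactlyTwoSameAdjacentDigits digits ≠ hasExactlyTwoSameAdjacentDigits_alt digits

-- ===== LEMMAS AND PROOFS =====

-- pvRLE with a running count c is the current run completed to c + takeWhile, then the RLE of the rest
lemma pvRLE_eq (rest : List Int) : ∀ (d : Int) (c : Nat),
    pvRLE d c rest =
      (c + (rest.takeWhile (fun x => x == d)).length)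
        :: pvRunLengths (rest.dropWhile (fun x => x == d)) := by
  induction rest with
  | nil => intro d c; simp [pvRLE, pvRunLengths]
  | cons x xs ih =>
    intro d c
    by_cases h : x = d
    · subst h
      rw [pvRLE]
      simp only [beq_self_eq_true, if_true, List.takeWhile_cons, List.dropWhile_cons,
        beq_self_eq_true, List.length_cons]
      rw [ih x (c + 1)]
      congr 1
      omega
    · have hb : (x == d) = false := by simp [h]
      rw [pvRLE]
      simp [hb, pvRunLengths]

-- B answers true exactly when some maximal run has length 2
lemma pvAltRun_eq_runLengths : ∀ (fuel : Nat) (l : List Int), l.length ≤ fuel →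
    pvAltRun fuel l = decide (2 ∈ pvRunLengths l) := by
  intro fuel
  induction fuel with
  | zero =>
    intro l hl
    have : l = [] := by cases l <;> simp_all
    subst this; simp [pvAltRun, pvRunLengths]
  | succ fuel ih =>
    intro l hl
    cases l with
    | nil => simp [pvAltRun, pvRunLengths]
    | cons d rest =>
      rw [pvAltRun, pvRunLengths, pvRLE_eq]
      rw [ih _ (le_trans (rest.length_dropWhile_le _) (by simpa using hl))]
      simp only [List.mem_cons]
      rw [Bool.eq_iff_iff]
      simp only [Bool.or_eq_true, beq_iff_eq, decide_eq_true_eq]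
      constructor <;> intro hh <;> rcases hh with hh | hh <;>
        first | (left; omega) | (right; exact hh)

-- A's loop, entered with current-run count c and previous value d, answers
-- "the current run extends to total count 2, or some later run has length 2"
lemma pv_scan (l : List Int) : ∀ (c d : Int),
    pvGoA l c d =
      ((c + ((l.takeWhile (fun x => x == d)).length : Int) == 2)
        || decide (2 ∈ pvRunLengths (l.dropWhile (fun x => x == d)))) := by
  induction l with
  | nil => intro c d; simp [pvGoA, pvRunLengths]
  | cons e rest ih =>
    intro c d
    by_cases h : e = d
    · subst h
      rw [pvGoA]
      simp only [beq_self_eq_true, if_true, List.takeWhile_cons, List.dropWhile_cons,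
        List.length_cons]
      rw [ih (c + 1) e]
      congr 2
      push_cast
      ring
    · have hb : (e == d) = false := by simp [h]
      rw [pvGoA]
      simp only [hb, Bool.false_eq_true, if_false, List.takeWhile_cons, List.dropWhile_cons,
        List.length_nil, Nat.cast_zero, add_zero]
      by_cases hc : c = 2
      · simp [hc]
      · have hcb : (c == 2) = false := by simp [hc]
        simp only [hcb, Bool.false_eq_true, if_false, Bool.false_or]
        rw [ih 1 e, pvRunLengths, pvRLE_eq]
        simp only [List.mem_cons]
        rw [Bool.eq_iff_iff]
        simp only [Bool.or_eq_true, beq_iff_eq, decide_eq_true_eq]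
        constructor <;> intro hh <;> [skip; skip] <;> rcases hh with hh | hh <;>
          first | (left; omega) | (right; exact hh)

-- ===== VERDICT (by name: the statement is the Claim_ definition above) =====
theorem hasExactlyTwoSameAdjacentDigits_spec : Claim_unchanged_hasExactlyTwoSameAdjacentDigits := by
  intro digits _ hnd
  show hasExactlyTwoSameAdjacentDigits digits = hasExactlyTwoSameAdjacentDigits_alt digits
  unfold hasExactlyTwoSameAdjacentDigits hasExactlyTwoSameAdjacentDigits_alt
  rw [pvAltRun_eq_runLengths _ _ le_rfl]
  cases digits with
  | nil => simp [pvGoA, pvRunLengths]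
  | cons d rest =>
    rw [pvRunLengths, pvRLE_eq]
    by_cases h : d = 10
    · subst h
      rw [pvGoA]
      simp only [beq_self_eq_true, if_true]
      rw [pv_scan]
      unfold D_hasExactlyTwoSameAdjacentDigits at hnd
      simp only [List.head?_cons, List.takeWhile_cons, List.dropWhile_cons,
        beq_self_eq_true, if_true, List.length_cons] at hnd ⊢
      set t := (rest.takeWhile (fun x => x == (10:Int))).length with ht
      by_cases hX : 2 ∈ pvRunLengths (rest.dropWhile (fun x => x == (10:Int)))
      · simp [hX]
      · have htbig : ¬ (t + 1 = 1 ∨ t + 1 = 2) := by tauto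
        rw [Bool.eq_iff_iff]
        simp only [Bool.or_eq_true, beq_iff_eq, decide_eq_true_eq, List.mem_cons, hX, or_false]
        omega
    · have hb : (d == (10:Int)) = false := by simp [h]
      rw [pvGoA]
      simp only [hb, Bool.false_eq_true, if_false, if_neg (by decide : ¬((1:Int) == 2) = true)]
      rw [pv_scan]
      simp only [List.mem_cons]
      rw [Bool.eq_iff_iff]
      simp only [Bool.or_eq_true, beq_iff_eq, decide_eq_true_eq]
      constructor <;> intro hh <;> rcases hh with hh | hh <;>
        first | (left; omega) | (right; exact hh)

theorem hasExactlyTwoSameAdjacentDigits_changed : Claim_changed_hasExactlyTwoSameAdjacentDigits := by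
  unfold Claim_changed_hasExactlyTwoSameAdjacentDigits; decide

theorem hasExactlyTwoSameAdjacentDigits_tight : Claim_exact_hasExactlyTwoSameAdjacentDigits := by
  intro digits _ hd
  obtain ⟨hhead, hk, hX⟩ := hd
  cases digits with
  | nil => simp at hhead
  | cons d rest =>
    have hd10 : d = 10 := by simpa using hhead
    subst hd10
    unfold hasExactlyTwoSameAdjacentDigits hasExactlyTwoSameAdjacentDigits_alt
    rw [pvAltRun_eq_runLengths _ _ le_rfl, pvRunLengths, pvRLE_eq, pvGoA]
    simp only [beq_self_eq_true, if_true]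
    rw [pv_scan]
    simp only [List.takeWhile_cons, List.dropWhile_cons, beq_self_eq_true, if_true,
      List.length_cons, List.mem_cons] at hk hX ⊢
    set t := (rest.takeWhile (fun x => x == (10:Int))).length with ht
    have hX' : ¬ 2 ∈ pvRunLengths (rest.dropWhile (fun x => x == (10:Int))) := hX
    have ht01 : t = 0 ∨ t = 1 := by omega
    rcases ht01 with h0 | h1
    · simp [hX', h0]
    · simp [hX', h1]
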